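-- pv_equiv track=rewrite | github.com/hklie/scrabble | scrabble/study/decks.py | group_by_prefix
-- ===== SOURCE A (Python) =====
-- def group_by_prefix(cards, min_group=5):
--     """Group cards by prefix. Only groups with >= min_group words are kept.
--     Returns dict of prefix → list of cards, sorted by group size desc."""
--     from collections import defaultdict
--     groups = defaultdict(list)
--     for c in cards:
--         if c["prefix"]:
--             groups[c["prefix"]].append(c)
--     # Filter small groups, sort by size descending
--     result = {k: v for k, v in groups.items() if len(v) >= min_group}
--     return dict(sorted(result.items(), key=lambda x: -len(x[1])))
-- ===== SOURCE B (Python) =====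
-- def group_by_prefix(cards, min_group=5):
--     """Group cards by prefix. Only groups with >= min_group words are kept.
--     Returns dict of prefix -> list of cards, sorted by group size desc."""
--     # Pass 1: count how many cards carry each (truthy) prefix.
--     counts = {}
--     for c in cards:
--         p = c["prefix"]
--         if p:
--             counts[p] = counts.get(p, 0) + 1
--     # Pass 2: collect cards only for prefixes that are already known to be big enough.
--     big = {}
--     for c in cards:
--         p = c["prefix"]
--         if p and counts[p] >= min_group:
--             if p in big:
--                 big[p].append(c)
--             else:
--                 big[p] = [c]
--     return dict(sorted(big.items(), key=lambda kv: len(kv[1]), reverse=True))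
-- ===== Notes on version B (the rewrite author's own statement) =====
-- stated objective: alternative
-- what changed: Replaces A's group-everything-then-filter defaultdict pass with a two-pass count-then-collect scheme: a first pass counts each truthy prefix, a second pass builds groups only for prefixes whose count already meets min_group, and the final sort uses key=len with reverse=True instead of key=-len.
import Mathlib
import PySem

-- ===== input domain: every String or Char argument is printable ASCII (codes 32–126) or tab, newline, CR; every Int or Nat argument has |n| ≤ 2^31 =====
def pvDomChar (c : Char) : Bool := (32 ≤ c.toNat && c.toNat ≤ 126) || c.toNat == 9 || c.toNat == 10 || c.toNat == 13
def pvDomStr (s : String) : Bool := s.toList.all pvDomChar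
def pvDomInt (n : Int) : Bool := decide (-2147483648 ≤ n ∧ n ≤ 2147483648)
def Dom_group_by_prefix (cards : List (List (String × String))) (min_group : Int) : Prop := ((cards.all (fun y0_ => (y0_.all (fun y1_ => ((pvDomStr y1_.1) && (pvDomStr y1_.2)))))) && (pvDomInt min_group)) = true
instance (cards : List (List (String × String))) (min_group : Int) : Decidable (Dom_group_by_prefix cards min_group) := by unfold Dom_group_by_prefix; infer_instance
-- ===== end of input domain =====

-- B counts each truthy prefix first, then collects groups only for prefixes whose count
-- already meets min_group, and sorts with key=len, reverse=True; same items, same order as A.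

-- c["prefix"], made total with a "" default; Pre_ excludes the cards where the key is absent (Python KeyError).
def pvPrefix (c : List (String × String)) : String :=
  ((PySem.Dict.mk c).get? "prefix").getD ""

-- ===== PORT A =====
def group_by_prefix (cards : List (List (String × String))) (min_group : Int) : List (String × List (List (String × String))) :=
  -- groups = the defaultdict(list) loop; result = the filtering dict comprehension; then dict(sorted(...))
  (PySem.Dict.ofList (PySem.List.sorted
    (PySem.Dict.ofList
      ((cards.foldl (fun g c =>
          if pvPrefix c ≠ "" then g.modify (pvPrefix c) [] (fun v => v ++ [c]) else g)
          PySem.Dict.empty).items.filter (fun kv => min_group ≤ (kv.2.length : Int)))).items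
    (fun x => -((x.2.length : Int))) false)).items

-- ===== PORT B =====
-- pass 1 of Source B: counts[p] = counts.get(p, 0) + 1 for each truthy prefix
def pvCounts (cards : List (List (String × String))) : PySem.Dict String Int :=
  cards.foldl (fun d c =>
    if pvPrefix c ≠ "" then d.insert (pvPrefix c) (d.getD (pvPrefix c) 0 + 1) else d)
    PySem.Dict.empty

-- pass 2 of Source B: collect cards only for prefixes whose count meets min_group
def pvBig (cards : List (List (String × String))) (min_group : Int) :
    PySem.Dict String (List (List (String × String))) :=
  cards.foldl (fun d c =>
    if pvPrefix c ≠ "" ∧ min_group ≤ (pvCounts cards).getD (pvPrefix c) 0 then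
      (if ((d.get? (pvPrefix c)).isSome) then d.modify (pvPrefix c) [] (fun v => v ++ [c])
       else d.insert (pvPrefix c) [c])
    else d)
    PySem.Dict.empty

def group_by_prefix_alt (cards : List (List (String × String))) (min_group : Int) : List (String × List (List (String × String))) :=
  -- dict(sorted(big.items(), key=lambda kv: len(kv[1]), reverse=True))
  (PySem.Dict.ofList (PySem.List.sorted (pvBig cards min_group).items
    (fun kv => ((kv.2.length : Int))) true)).items

-- ===== PRECONDITION & SPEC =====
-- Pre_: every card has a "prefix" key — exactly where Python A returns (otherwise c["prefix"] raises KeyError).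
def Pre_group_by_prefix (cards : List (List (String × String))) (min_group : Int) : Prop :=
  ∀ c ∈ cards, (((PySem.Dict.mk c).get? "prefix").isSome = true)
instance (cards : List (List (String × String))) (min_group : Int) : Decidable (Pre_group_by_prefix cards min_group) := by unfold Pre_group_by_prefix; infer_instance

def pvWitness_group_by_prefix : (List (List (String × String))) × Int :=
  ([[("prefix", "a"), ("word", "axe")], [("prefix", "a"), ("word", "ant")]], 2)

def Spec_group_by_prefix (cards : List (List (String × String))) (min_group : Int) (out : List (String × List (List (String × String)))) : Prop := out = group_by_prefix_alt cards min_group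
instance (cards : List (List (String × String))) (min_group : Int) (out : List (String × List (List (String × String)))) : Decidable (Spec_group_by_prefix cards min_group out) := by unfold Spec_group_by_prefix; infer_instance

-- ===== CLAIM (what is proved, stated in full; the proofs are below) =====
def Claim_equal_group_by_prefix : Prop := ∀ (cards : List (List (String × String))) (min_group : Int), Dom_group_by_prefix cards min_group → Pre_group_by_prefix cards min_group → Spec_group_by_prefix cards min_group (group_by_prefix cards min_group)

-- ===== LEMMAS AND PROOFS =====

-- proof-side predicate: "prefix is truthy and its total count meets min_group" (B's pass-2 guard)
def pvPB (cards : List (List (String × String))) (min_group : Int) (s : String) : Bool :=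
  (!(s == "")) && decide (min_group ≤ ((cards.filter (fun c => pvPrefix c == s)).length : Int))

-- dict(l) on an association list with distinct keys keeps it unchanged
theorem pv_items_ofList {κ ν : Type} [BEq κ] [LawfulBEq κ] (l : List (κ × ν))
    (h : (l.map Prod.fst).Nodup) : (PySem.Dict.ofList l).items = l := by
  have := PySem.Dict.items_foldl_insert_fresh l Prod.fst Prod.snd PySem.Dict.empty
    (fun a _ => by simp [pysem]) h
  simpa [PySem.Dict.ofList, PySem.Dict.update] using this

-- the dict-append loop over the cards whose prefix satisfies P, characterised: its items are
-- the first-appearance such prefixes, each paired with the filter of all cards carrying it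
theorem pv_groups_items (cards : List (List (String × String))) (P : String → Bool) :
    (cards.foldl (fun g c =>
        if P (pvPrefix c) = true then g.modify (pvPrefix c) [] (fun v => v ++ [c]) else g)
        PySem.Dict.empty).items
    = (PySem.List.dedup ((cards.filter (fun c => P (pvPrefix c))).map pvPrefix)).map
        (fun p => (p, cards.filter (fun c => P (pvPrefix c) && pvPrefix c == p))) := by
  set fcards := cards.filter (fun c => P (pvPrefix c)) with hf
  have hfold : (cards.foldl (fun g c =>
      if P (pvPrefix c) = true then g.modify (pvPrefix c) [] (fun v => v ++ [c]) else g)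
      (PySem.Dict.empty : PySem.Dict String (List (List (String × String)))))
      = (fcards.map (fun c => (pvPrefix c, c))).foldl
          (fun d p => d.modify p.1 [] (fun v => v ++ [p.2])) PySem.Dict.empty := by
    rw [List.foldl_map, hf, List.foldl_filter]
  set l' := fcards.map (fun c => (pvPrefix c, c)) with hl'
  set G := l'.foldl (fun d p => d.modify p.1 [] (fun v => v ++ [p.2]))
    (PySem.Dict.empty : PySem.Dict String (List (List (String × String)))) with hG
  have hnodup : G.keys.Nodup := by
    rw [hG]
    exact PySem.Dict.nodup_keys_foldl_modify_key l' Prod.fst [] (fun _ p v => v ++ [p.2]) _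
      PySem.Dict.nodup_keys_empty
  have hkeys : G.keys = PySem.Set.ofList (fcards.map pvPrefix) := by
    rw [hG]
    rw [PySem.Dict.keys_foldl_modify_key l' Prod.fst [] (fun _ p v => v ++ [p.2])]
    simp [hl', PySem.Set.update, PySem.Set.ofList_eq_foldl, List.map_map, Function.comp_def,
      PySem.Dict.keys_empty]
  have hget : ∀ k, G.getD k [] = (l'.filter (fun p => p.1 == k)).map Prod.snd := by
    intro k
    rw [hG]
    simp [pysem, PySem.Dict.getD_foldl_modify_append l' PySem.Dict.empty k]
  rw [hfold]
  rw [PySem.Dict.items_eq_map_keys G hnodup []]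
  rw [hkeys, ← PySem.List.dedup_eq_ofList]
  apply List.map_congr_left
  intro k hk
  have hkmem : k ∈ fcards.map pvPrefix := (PySem.List.mem_dedup (xs := fcards.map pvPrefix) (x := k)).1 hk
  have hkP : P k = true := by
    obtain ⟨c, hc, hpc⟩ := List.mem_map.1 hkmem
    have := List.mem_filter.1 (hf ▸ hc)
    subst hpc
    exact this.2
  have : G.getD k [] = cards.filter (fun c => P (pvPrefix c) && pvPrefix c == k) := by
    rw [hget k, hl', List.filter_map]
    rw [List.map_map]
    have : (fcards.filter ((fun p => p.1 == k) ∘ fun c => (pvPrefix c, c))).map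
        (Prod.snd ∘ fun c => (pvPrefix c, c))
        = fcards.filter (fun c => pvPrefix c == k) := by
      simp [Function.comp_def]
    rw [this, hf, List.filter_filter]
    simp [Bool.and_comm]
  rw [this]

-- the Set.add fold commutes with a filter of both the accumulator and the input
theorem pv_foldl_add_filter {α : Type} [BEq α] [LawfulBEq α] (q : α → Bool) (xs : List α) :
    ∀ acc : List α,
      (List.foldl PySem.Set.add acc xs).filter q
        = List.foldl PySem.Set.add (acc.filter q) (xs.filter q) := by
  induction xs with
  | nil => intro acc; rfl
  | cons x xs ih =>
    intro acc
    by_cases hq : q x = true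
    · have hadd : (PySem.Set.add acc x).filter q = PySem.Set.add (acc.filter q) x := by
        simp only [PySem.Set.add, PySem.Set.contains]
        by_cases hm : x ∈ acc
        · simp [hm, List.mem_filter, hq]
        · simp [hm, List.mem_filter, hq, List.filter_append]
      simp only [List.foldl_cons, List.filter_cons, hq, if_pos, ih (PySem.Set.add acc x), hadd]
    · have hadd : (PySem.Set.add acc x).filter q = acc.filter q := by
        simp only [PySem.Set.add, PySem.Set.contains]
        by_cases hm : x ∈ acc
        · simp [hm]
        · simp [hm, List.filter_append, hq]
      simp only [List.foldl_cons, List.filter_cons, hq, ih (PySem.Set.add acc x), hadd]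
      simp

-- filtering before deduplicating = deduplicating before filtering
theorem pv_dedup_filter {α : Type} [BEq α] [LawfulBEq α] (q : α → Bool) (xs : List α) :
    PySem.List.dedup (xs.filter q) = (PySem.List.dedup xs).filter q := by
  rw [PySem.List.dedup_eq_ofList, PySem.List.dedup_eq_ofList, PySem.Set.ofList, PySem.Set.ofList]
  rw [pv_foldl_add_filter q xs PySem.Set.empty]
  rfl

-- B's pass-1 counter, characterised: counts.getD p 0 counts the cards with (truthy) prefix p
theorem pv_counts_getD (cards : List (List (String × String))) (p : String) (hp : p ≠ "") :
    (pvCounts cards).getD p 0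
    = ((cards.filter (fun c => pvPrefix c == p)).length : Int) := by
  unfold pvCounts
  have hstep : (fun (d : PySem.Dict String Int) c =>
      if pvPrefix c ≠ "" then d.insert (pvPrefix c) (d.getD (pvPrefix c) 0 + 1) else d)
      = (fun d c => if pvPrefix c ≠ "" then d.modify (pvPrefix c) 0 (fun x => x + 1) else d) := rfl
  rw [hstep]
  have hfold : (cards.foldl (fun d c =>
      if pvPrefix c ≠ "" then d.modify (pvPrefix c) 0 (fun x => x + 1) else d)
      (PySem.Dict.empty : PySem.Dict String Int))
      = ((cards.filter (fun c => pvPrefix c ≠ "")).map pvPrefix).foldl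
          (fun d x => d.modify x 0 (fun x => x + 1)) PySem.Dict.empty := by
    rw [List.foldl_map, List.foldl_filter]
    simp only [decide_eq_true_eq]
  rw [hfold, PySem.Dict.getD_foldl_modify_add_one]
  rw [PySem.Dict.getD_empty, zero_add]
  congr 1
  rw [List.count_eq_countP, List.countP_map, List.countP_eq_length_filter]
  rw [List.filter_filter]
  congr 1
  apply List.filter_congr
  intro c _
  by_cases h : pvPrefix c = p
  · simp [h, hp]
  · simp [h]

-- sorted by the negated size, ascending = sorted by the size, reverse=True (Python's stable reverse rule)
theorem pv_sorted_neg_rev {α : Type} (xs : List α) (k : α → Int) :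
    PySem.List.sorted xs (fun x => -(k x)) false = PySem.List.sorted xs k true := by
  rw [PySem.List.sorted_eq_foldl_insertBy, PySem.List.sorted_rev_eq_foldl_insertBy]
  have : (fun (acc : List α) x => PySem.List.insertBy (fun a b => decide (-(k a) < -(k b))) x acc)
       = (fun acc x => PySem.List.insertBy (fun a b => decide (k b < k a)) x acc) := by
    funext acc x
    congr 1
    funext a b
    simp
  rw [this]

-- B's pass-2 loop, characterised via pv_groups_items: its guard is a predicate of the prefix alone
theorem pv_big_items (cards : List (List (String × String))) (min_group : Int) :
    (pvBig cards min_group).items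
    = (PySem.List.dedup ((cards.filter (fun c => pvPB cards min_group (pvPrefix c))).map pvPrefix)).map
        (fun p => (p, cards.filter (fun c => pvPB cards min_group (pvPrefix c) && pvPrefix c == p))) := by
  unfold pvBig
  have hB : (fun (d : PySem.Dict String (List (List (String × String)))) c =>
      if pvPrefix c ≠ "" ∧ min_group ≤ (pvCounts cards).getD (pvPrefix c) 0 then
        (if ((d.get? (pvPrefix c)).isSome) then d.modify (pvPrefix c) [] (fun v => v ++ [c])
         else d.insert (pvPrefix c) [c])
      else d)
      = (fun d c => if pvPB cards min_group (pvPrefix c) = true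
          then d.modify (pvPrefix c) [] (fun v => v ++ [c]) else d) := by
    funext d c
    by_cases h1 : pvPrefix c = ""
    · simp [h1, pvPB]
    · rw [pv_counts_getD cards (pvPrefix c) h1]
      by_cases h2 : min_group ≤ ((cards.filter (fun x => pvPrefix x == pvPrefix c)).length : Int)
      · have hg : pvPB cards min_group (pvPrefix c) = true := by simp [pvPB, h1, h2]
        rw [if_pos ⟨h1, h2⟩, if_pos hg]
        by_cases h3 : (d.get? (pvPrefix c)).isSome
        · rw [if_pos h3]
        · rw [if_neg h3]
          have hnone : d.get? (pvPrefix c) = none := Option.not_isSome_iff_eq_none.mp h3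
          simp [PySem.Dict.modify, PySem.Dict.getD, hnone]
      · have hg : pvPB cards min_group (pvPrefix c) = false := by simp [pvPB, h2]
        rw [if_neg (by tauto), if_neg (by simp [hg])]
  rw [hB, pv_groups_items cards (pvPB cards min_group)]

-- ===== VERDICT (by name: the statement is the Claim_ definition above) =====
theorem group_by_prefix_spec : Claim_equal_group_by_prefix := by
  intro cards min_group _ _
  unfold Spec_group_by_prefix group_by_prefix group_by_prefix_alt
  -- A's loop guard, as the Boolean predicate of the prefix it tests
  have hA : (fun (g : PySem.Dict String (List (List (String × String)))) c =>
      if pvPrefix c ≠ "" then g.modify (pvPrefix c) [] (fun v => v ++ [c]) else g)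
      = (fun g c => if (!(pvPrefix c == "")) = true
          then g.modify (pvPrefix c) [] (fun v => v ++ [c]) else g) := by
    funext g c
    by_cases h : pvPrefix c = "" <;> simp [h]
  rw [hA, pv_groups_items cards (fun s => !(s == "")), pv_big_items cards min_group]
  -- names for the pieces
  set XA := (cards.filter (fun c => (!(pvPrefix c == "")))).map pvPrefix with hXA
  set grpPair := fun p => (p, cards.filter (fun c => pvPrefix c == p)) with hgrp
  -- the inner dict comprehension of A keeps its (nodup-keyed) list unchanged
  have hnodupA : ((((PySem.List.dedup XA).map
      (fun p => (p, cards.filter (fun c => (!(pvPrefix c == "")) && pvPrefix c == p)))).filter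
      (fun kv => min_group ≤ (kv.2.length : Int))).map Prod.fst).Nodup := by
    have h1 : (((PySem.List.dedup XA).map
        (fun p => (p, cards.filter (fun c => (!(pvPrefix c == "")) && pvPrefix c == p)))).map Prod.fst).Nodup := by
      rw [List.map_map]
      simpa [Function.comp_def] using PySem.List.nodup_dedup XA
    exact h1.sublist (List.Sublist.map Prod.fst List.filter_sublist)
  rw [pv_items_ofList _ hnodupA]
  -- in both map bodies, drop the redundant guard conjunct (it holds for every listed prefix)
  have hmapA : (PySem.List.dedup XA).map
      (fun p => (p, cards.filter (fun c => (!(pvPrefix c == "")) && pvPrefix c == p)))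
      = (PySem.List.dedup XA).map grpPair := by
    apply List.map_congr_left
    intro p hp
    have hpP : (!(p == "")) = true := by
      obtain ⟨c, hc, hpc⟩ := List.mem_map.1 ((PySem.List.mem_dedup _ _).1 hp)
      have := List.mem_filter.1 hc
      subst hpc
      exact this.2
    simp only [hgrp]
    congr 1
    apply List.filter_congr
    intro c _
    by_cases h : pvPrefix c = p
    · simp [h, hpP]
    · simp [h]
  have hmapB : (PySem.List.dedup ((cards.filter (fun c => pvPB cards min_group (pvPrefix c))).map pvPrefix)).map
      (fun p => (p, cards.filter (fun c => pvPB cards min_group (pvPrefix c) && pvPrefix c == p)))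
      = (PySem.List.dedup ((cards.filter (fun c => pvPB cards min_group (pvPrefix c))).map pvPrefix)).map grpPair := by
    apply List.map_congr_left
    intro p hp
    have hpP : pvPB cards min_group p = true := by
      obtain ⟨c, hc, hpc⟩ := List.mem_map.1 ((PySem.List.mem_dedup _ _).1 hp)
      have := List.mem_filter.1 hc
      subst hpc
      exact this.2
    simp only [hgrp]
    congr 1
    apply List.filter_congr
    intro c _
    by_cases h : pvPrefix c = p
    · simp [h, hpP]
    · simp [h]
  rw [hmapA, hmapB]
  -- B's prefix list is A's, filtered by the size test
  have hXB : (cards.filter (fun c => pvPB cards min_group (pvPrefix c))).map pvPrefix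
      = XA.filter (fun s => decide (min_group ≤ ((cards.filter (fun c => pvPrefix c == s)).length : Int))) := by
    rw [hXA, List.filter_map]
    congr 1
    rw [List.filter_filter]
    apply List.filter_congr
    intro c _
    simp [pvPB, Bool.and_comm]
  rw [hXB, pv_dedup_filter]
  -- A's item filter, pushed through the map, is the same size test on the prefix
  rw [List.filter_map]
  have hQ : ((fun kv => decide (min_group ≤ ((Prod.snd kv).length : Int))) ∘ grpPair)
      = (fun s => decide (min_group ≤ ((cards.filter (fun c => pvPrefix c == s)).length : Int))) := by
    funext p
    simp [hgrp]
  rw [hQ]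
  -- sorted by -len ascending = sorted by len, reverse=True
  rw [pv_sorted_neg_rev _ (fun kv : String × List (List (String × String)) => ((kv.2.length : Int)))]
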